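-- pv_equiv track=rewrite | github.com/antentyk/battleship | visualize/field_to_str.py | field_to_str
-- ===== SOURCE A (Python) =====
-- def field_to_str(battlefield):
--     """
--     dict[(int, int) : None or bool] -> str
--
--     converts dictionary - battlefield representation to string
--     and returns this string
--
--     for more information about input and output format
--     read read_field.py -> read_field() documentation
--     """
--     convert = {None: ' ', True: 'X', False: '*'}
--     symbols = ''
--     for cell in sorted(battlefield.keys()):
--         symbols += convert[battlefield[cell]]
--     rows = []
--     for i in range(10):
--         rows.append(symbols[i * 10: i * 10 + 10])
--     return '\n'.join(rows)
-- ===== SOURCE B (Python) =====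
-- def field_to_str(battlefield):
--     convert = {None: ' ', True: 'X', False: '*'}
--     rows = [''] * 10
--     for idx, cell in enumerate(sorted(battlefield)):
--         rows[idx // 10] += convert[battlefield[cell]]
--     return '\n'.join(rows)
-- ===== Notes on version B (the rewrite author's own statement) =====
-- stated objective: simpler
-- what changed: B appends each converted cell directly into its row bucket in a single enumerate pass over the sorted cells, instead of A's two-phase build-a-flat-100-char-string-then-slice-it-into-rows; Pre_ excludes battlefields with more than 100 distinct cells, where A silently truncates the overflow via its slicing while B's row indexing raises IndexError.
import Mathlib
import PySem

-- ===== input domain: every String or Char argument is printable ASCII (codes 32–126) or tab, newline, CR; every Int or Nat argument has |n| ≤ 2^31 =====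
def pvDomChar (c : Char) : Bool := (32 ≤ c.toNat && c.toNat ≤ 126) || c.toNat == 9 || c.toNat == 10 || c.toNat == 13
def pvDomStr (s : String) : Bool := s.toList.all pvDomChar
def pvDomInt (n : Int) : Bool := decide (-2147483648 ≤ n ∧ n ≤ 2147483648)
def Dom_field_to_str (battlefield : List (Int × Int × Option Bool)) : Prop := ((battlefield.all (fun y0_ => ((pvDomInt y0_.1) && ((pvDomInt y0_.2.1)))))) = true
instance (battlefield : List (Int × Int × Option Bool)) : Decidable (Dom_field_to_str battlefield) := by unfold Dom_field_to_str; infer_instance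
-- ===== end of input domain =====

-- B builds each row directly in one enumerate pass over the sorted cells instead of
-- A's flat-string-then-slice two-phase construction; objective: simpler decomposition.

-- ===== PORT A =====
-- the `convert` dict literal of both Pythons (total on Option Bool; each value is one character)
def pvConvert : Option Bool → Char
  | none => ' '
  | some true => 'X'
  | some false => '*'

def field_to_str (battlefield : List (Int × Int × Option Bool)) : String :=
  let d : PySem.Dict (Int × Int) (Option Bool) :=
    PySem.Dict.ofList (battlefield.map (fun p => ((p.1, p.2.1), p.2.2)))
  let cells := PySem.List.sorted2 d.keys (fun c => c.1) (fun c => c.2)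
  let symbols : List Char :=
    cells.foldl (fun s cell => s ++ [pvConvert ((d.get? cell).getD none)]) []
  let rows : List (List Char) :=
    (PySem.List.pyRange 0 10 1).foldl
      (fun rows i => rows ++ [PySem.List.slice symbols (some (i * 10)) (some (i * 10 + 10))]) []
  String.ofList (PySem.Chars.join ['\n'] rows)

-- ===== PORT B =====
-- rows[idx // 10] += c is an index ASSIGNMENT: ported with pySetD/pyGetD, exact while the
-- index is in range, which Pre_ (at most 100 distinct cells) guarantees.
def field_to_str_alt (battlefield : List (Int × Int × Option Bool)) : String :=
  let d : PySem.Dict (Int × Int) (Option Bool) :=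
    PySem.Dict.ofList (battlefield.map (fun p => ((p.1, p.2.1), p.2.2)))
  let rows : List (List Char) :=
    (PySem.List.enumerate (PySem.List.sorted2 d.keys (fun c => c.1) (fun c => c.2)) 0).foldl
      (fun rows p =>
        PySem.List.pySetD rows (PySem.Int.floordiv p.1 10)
          (PySem.List.pyGetD rows (PySem.Int.floordiv p.1 10) [] ++
            [pvConvert ((d.get? p.2).getD none)]))
      (List.replicate 10 [])
  String.ofList (PySem.Chars.join ['\n'] rows)

-- ===== PRECONDITION & SPEC =====
-- Pre_ excludes battlefields with MORE THAN 100 distinct cells: there A's slicing silently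
-- drops the cells beyond the 100th (an artefact of its flat-string construction) while B's
-- row indexing raises IndexError.
def Pre_field_to_str (battlefield : List (Int × Int × Option Bool)) : Prop :=
  (PySem.Set.ofList (battlefield.map (fun p => (p.1, p.2.1)))).length ≤ 100
instance (battlefield : List (Int × Int × Option Bool)) : Decidable (Pre_field_to_str battlefield) := by unfold Pre_field_to_str; infer_instance

def pvWitness_field_to_str : (List (Int × Int × Option Bool)) := [(0, 0, some true), (0, 1, none)]

def Spec_field_to_str (battlefield : List (Int × Int × Option Bool)) (out : String) : Prop := out = field_to_str_alt battlefield
instance (battlefield : List (Int × Int × Option Bool)) (out : String) : Decidable (Spec_field_to_str battlefield out) := by unfold Spec_field_to_str; infer_instance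

-- ===== CLAIM (what is proved, stated in full; the proofs are below) =====
def Claim_equal_field_to_str : Prop := ∀ (battlefield : List (Int × Int × Option Bool)), Dom_field_to_str battlefield → Pre_field_to_str battlefield → Spec_field_to_str battlefield (field_to_str battlefield)

-- ===== LEMMAS AND PROOFS =====

-- the chunk of the converted characters that B's loop, started at global index s, appends to row i
def pvSeg (cs : List Char) (s i : Nat) : List Char :=
  (cs.drop (10 * i - s)).take (min 10 (10 * i + 10 - s))

theorem pvRows_id (rows : List (List Char)) (h : rows.length = 10) :
    (List.range 10).map (fun i => rows.getD i []) = rows := by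
  apply List.ext_getElem
  · simp [h]
  · intro i h1 h2
    simp [List.getD, List.getElem?_eq_getElem h2]

theorem pvFoldB {α : Type} (f : α → Char) (xs : List α) :
    ∀ (s : Nat) (rows : List (List Char)), rows.length = 10 → s + xs.length ≤ 100 →
    (PySem.List.enumerate xs (s : Int)).foldl
      (fun rows p =>
        PySem.List.pySetD rows (PySem.Int.floordiv p.1 10)
          (PySem.List.pyGetD rows (PySem.Int.floordiv p.1 10) [] ++ [f p.2]))
      rows
    = (List.range 10).map (fun i => rows.getD i [] ++ pvSeg (xs.map f) s i) := by
  induction xs with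
  | nil =>
      intro s rows h _
      simp [PySem.List.enumerate_nil, pvSeg]
      exact (pvRows_id rows h).symm
  | cons x t ih =>
      intro s rows h hlen
      rw [PySem.List.enumerate_cons]
      simp only [List.foldl_cons]
      have hcast : (s : Int) + 1 = ((s + 1 : Nat) : Int) := by push_cast; ring
      have hs : s < 100 := by simp [List.length_cons] at hlen; omega
      have hfd : PySem.Int.floordiv (s : Int) 10 = ((s / 10 : Nat) : Int) := by
        rw [show (10 : Int) = ((10 : Nat) : Int) from by norm_num]
        exact PySem.Int.floordiv_natCast s 10
      rw [hfd, PySem.List.pySetD_natCast, PySem.List.pyGetD_natCast,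
        hcast, ih (s + 1) _ (by simp [h]) (by simp [List.length_cons] at hlen ⊢; omega)]
      apply List.map_congr_left
      intro i hi
      simp only [List.mem_range] at hi
      have hj : s / 10 < 10 := by omega
      have hgd : ∀ (r : List (List Char)) (k : Nat), r.getD k [] = (r[k]?).getD [] := by
        intro r k; rfl
      by_cases hij : i = s / 10
      · subst hij
        have hwin : 10 * (s / 10) ≤ s ∧ s < 10 * (s / 10) + 10 := by omega
        rw [hgd, hgd, List.getElem?_set_self (by omega)]
        have h1 : pvSeg ((x :: t).map f) s (s / 10) = f x :: pvSeg (t.map f) (s + 1) (s / 10) := by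
          unfold pvSeg
          have hd : 10 * (s / 10) - s = 0 := by omega
          have hd' : 10 * (s / 10) - (s + 1) = 0 := by omega
          have hm : min 10 (10 * (s / 10) + 10 - s) = (min 10 (10 * (s / 10) + 10 - (s + 1))) + 1 := by
            omega
          rw [hd, hd', hm]
          simp [List.take_succ_cons]
        rw [h1]
        simp
      · rw [hgd, hgd, List.getElem?_set_ne (by omega)]
        have h2 : pvSeg ((x :: t).map f) s i = pvSeg (t.map f) (s + 1) i := by
          unfold pvSeg
          by_cases hlo : s < 10 * i
          · have hd : 10 * i - s = (10 * i - (s + 1)) + 1 := by omega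
            have hm : min 10 (10 * i + 10 - s) = 10 := by omega
            have hm' : min 10 (10 * i + 10 - (s + 1)) = 10 := by omega
            rw [hd, hm, hm', List.map_cons, List.drop_succ_cons]
          · have hhi : 10 * i + 10 ≤ s := by omega
            have hm : min 10 (10 * i + 10 - s) = 0 := by omega
            have hm' : min 10 (10 * i + 10 - (s + 1)) = 0 := by omega
            rw [hm, hm']
            simp
        rw [h2, hgd]

theorem pvFoldA (symbols : List Char) :
    (PySem.List.pyRange 0 10 1).foldl
      (fun rows i => rows ++ [PySem.List.slice symbols (some (i * 10)) (some (i * 10 + 10))]) []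
    = (List.range 10).map (fun i => (symbols.drop (10 * i)).take 10) := by
  rw [PySem.List.foldl_append_singleton_eq_map]
  have hr : PySem.List.pyRange 0 10 1 = (List.range 10).map (fun k : Nat => (k : Int)) := by
    decide
  rw [hr, List.map_map]
  apply List.map_congr_left
  intro k _
  show PySem.List.slice symbols (some ((k : Int) * 10)) (some ((k : Int) * 10 + 10)) = _
  have h1 : ((k : Int) * 10) = ((10 * k : Nat) : Int) := by push_cast; ring
  have h2 : ((k : Int) * 10 + 10) = ((10 * k : Nat) : Int) + ((10 : Nat) : Int) := by push_cast; ring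
  rw [h2, h1, PySem.List.slice_natCast_add]

theorem pvKeysLen (battlefield : List (Int × Int × Option Bool)) :
    (PySem.Dict.ofList (battlefield.map (fun p => ((p.1, p.2.1), p.2.2)))).keys
      = PySem.Set.ofList (battlefield.map (fun p => (p.1, p.2.1))) := by
  simp [PySem.Dict.ofList, PySem.Dict.update, PySem.Dict.keys_foldl_insert_key,
    PySem.Set.update, PySem.Set.ofList_eq_foldl, List.map_map]
  rfl

-- ===== VERDICT (by name: the statement is the Claim_ definition above) =====
theorem field_to_str_spec : Claim_equal_field_to_str := by
  intro battlefield _ hpre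
  unfold Spec_field_to_str field_to_str field_to_str_alt
  simp only []
  apply congrArg
  apply congrArg
  have hcells : (PySem.List.sorted2
      (PySem.Dict.ofList (battlefield.map (fun p => ((p.1, p.2.1), p.2.2)))).keys
      (fun c => c.1) (fun c => c.2)).length ≤ 100 := by
    rw [(PySem.List.sorted2_perm _ _ _ _).length_eq, pvKeysLen]
    exact hpre
  have hB := pvFoldB (fun cell => pvConvert (((PySem.Dict.ofList (battlefield.map (fun p => ((p.1, p.2.1), p.2.2)))).get? cell).getD none)) _ 0 (List.replicate 10 []) (by simp) (by simpa using hcells)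
  simp only [Nat.cast_zero] at hB
  rw [pvFoldA, PySem.List.foldl_append_singleton_eq_map, hB]
  apply List.map_congr_left
  intro i hi
  simp only [List.mem_range] at hi
  have hrep : (List.replicate 10 ([] : List Char)).getD i [] = [] := by
    interval_cases i <;> rfl
  rw [hrep]
  unfold pvSeg
  simp
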